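-- pv_equiv track=rewrite | github.com/Bigsby/aoc | 2018/02/py/run.py | part1
-- ===== SOURCE A (Python) =====
-- from typing import List, Tuple
--
-- def part1(ids: List[str]) -> int:
--     twice_count = 0
--     thrice_count = 0
--     for id in ids:
--         id_counts = { id.count(c) for c in id }
--         twice_count += 2 in id_counts
--         thrice_count += 3 in id_counts
--     return twice_count * thrice_count
-- ===== SOURCE B (Python) =====
-- from typing import List, Tuple
--
-- def part1(ids: List[str]) -> int:
--     twice_count = 0
--     thrice_count = 0
--     for id in ids:
--         s = sorted(id)
--         lengths = set()
--         i = 0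
--         while i < len(s):
--             j = i
--             while j < len(s) and s[j] == s[i]:
--                 j += 1
--             lengths.add(j - i)
--             i = j
--         twice_count += 2 in lengths
--         thrice_count += 3 in lengths
--     return twice_count * thrice_count
-- ===== Notes on version B (the rewrite author's own statement) =====
-- stated objective: alternative
-- what changed: Per id, B sorts the characters and scans the sorted list once, collecting consecutive run lengths, instead of A's per-character id.count(c) rescans gathered into a set; correct because in a sorted string each letter's occurrences are one contiguous run whose length is its count.
import Mathlib
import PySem

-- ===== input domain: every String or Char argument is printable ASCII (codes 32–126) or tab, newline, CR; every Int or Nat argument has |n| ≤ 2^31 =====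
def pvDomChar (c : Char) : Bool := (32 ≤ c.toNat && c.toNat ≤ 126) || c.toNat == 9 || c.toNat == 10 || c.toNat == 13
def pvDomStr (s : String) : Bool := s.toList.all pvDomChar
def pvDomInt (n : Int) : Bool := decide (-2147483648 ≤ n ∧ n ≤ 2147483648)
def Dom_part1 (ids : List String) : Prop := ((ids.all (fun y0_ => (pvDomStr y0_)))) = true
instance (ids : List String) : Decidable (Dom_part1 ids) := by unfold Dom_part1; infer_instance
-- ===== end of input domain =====

-- B sorts each id's characters and scans consecutive runs for their lengths, instead of A's per-character id.count(c) rescans.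

-- ===== PORT A =====
def part1 (ids : List String) : Int :=
  let r := ids.foldl (fun (acc : Int × Int) id =>
    let idCounts : PySem.Set Int :=
      PySem.Set.ofList (id.toList.map (fun c => ((PySem.Str.count id (String.ofList [c]) : Nat) : Int)))
    (acc.1 + (if PySem.Set.contains idCounts 2 then 1 else 0),
     acc.2 + (if PySem.Set.contains idCounts 3 then 1 else 0))) (0, 0)
  r.1 * r.2

-- ===== PORT B =====
-- the inner while loop of Source B: one run of equal characters at the front, then recurse on the rest
def runLengths : List Char → List Int
  | [] => []
  | c :: t =>
      (((t.takeWhile (fun x => x == c)).length + 1 : Nat) : Int)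
        :: runLengths (t.dropWhile (fun x => x == c))
  termination_by l => l.length
  decreasing_by
    simp only [List.length_cons]
    exact Nat.lt_succ_of_le (List.length_dropWhile_le _ _)

def part1_alt (ids : List String) : Int :=
  let r := ids.foldl (fun (acc : Int × Int) id =>
    let s := PySem.List.sorted id.toList (fun c => c) false
    let lengths : PySem.Set Int := PySem.Set.ofList (runLengths s)
    (acc.1 + (if PySem.Set.contains lengths 2 then 1 else 0),
     acc.2 + (if PySem.Set.contains lengths 3 then 1 else 0))) (0, 0)
  r.1 * r.2

-- ===== PRECONDITION & SPEC =====
def Spec_part1 (ids : List String) (out : Int) : Prop := out = part1_alt ids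
instance (ids : List String) (out : Int) : Decidable (Spec_part1 ids out) := by unfold Spec_part1; infer_instance

-- ===== CLAIM (what is proved, stated in full; the proofs are below) =====
def Claim_equal_part1 : Prop := ∀ (ids : List String), Dom_part1 ids → Spec_part1 ids (part1 ids)

-- ===== LEMMAS AND PROOFS =====

-- str.count with a single-character needle counts occurrences of that character
theorem chars_count_go_single (c : Char) (l : List Char) (fuel : Nat) (acc : Nat)
    (h : l.length ≤ fuel) : PySem.Chars.count.go [c] fuel l acc = acc + l.count c := by
  induction l generalizing fuel acc with
  | nil => cases fuel <;> simp [PySem.Chars.count.go]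
  | cons hd t ih =>
      cases fuel with
      | zero => simp at h
      | succ n =>
          simp only [List.length_cons, Nat.succ_le_succ_iff] at h
          rw [PySem.Chars.count.go]
          by_cases hc : c = hd
          · subst hc
            simp [List.isPrefixOf, ih _ _ h]
            omega
          · have hpre : [c].isPrefixOf (hd :: t) = false := by
              simp [List.isPrefixOf]; exact fun hh => (hc (hh ▸ rfl)).elim
            have hne : (hd == c) = false := beq_eq_false_iff_ne.mpr (fun hh => hc hh.symm)
            simp only [hpre, if_neg Bool.false_ne_true, List.count_cons]
            rw [ih _ _ h]
            simp [hne]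

theorem chars_count_single (s : List Char) (c : Char) :
    PySem.Chars.count s [c] = s.count c := by
  simp [PySem.Chars.count, chars_count_go_single c s s.length 0 (le_refl _)]

-- on a sorted character list, the run lengths are exactly the occurrence counts of its members
theorem mem_runLengths_sorted (n : Nat) (m : List Char) (hlen : m.length ≤ n)
    (hs : m.Pairwise (· ≤ ·)) (k : Int) :
    k ∈ runLengths m ↔ ∃ c ∈ m, ((m.count c : Nat) : Int) = k := by
  induction n generalizing m with
  | zero =>
      have : m = [] := List.length_eq_zero_iff.mp (Nat.le_zero.mp hlen)
      subst this; simp [runLengths]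
  | succ n ih =>
      cases m with
      | nil => simp [runLengths]
      | cons c t =>
          have hct : ∀ x ∈ t, c ≤ x := (List.pairwise_cons.mp hs).1
          have ht : t.Pairwise (· ≤ ·) := (List.pairwise_cons.mp hs).2
          set tw := t.takeWhile (fun x => x == c) with htw
          set td := t.dropWhile (fun x => x == c) with htd
          have hsplit : tw ++ td = t := List.takeWhile_append_dropWhile
          have htwc : ∀ x ∈ tw, x = c := by
            intro x hx
            rw [htw] at hx
            have h' := List.mem_takeWhile_imp hx
            simpa using h'
          have htd_sub : td.Sublist t := htd ▸ List.dropWhile_sublist _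
          have htd_pw : td.Pairwise (· ≤ ·) := ht.sublist htd_sub
          have htd_gt : ∀ x ∈ td, c < x := by
            intro x hx
            cases hdd : td with
            | nil => rw [hdd] at hx; simp at hx
            | cons d td' =>
                have hdne : ¬ (d == c) = true := by
                  have := List.head_dropWhile_not (p := fun x => x == c) (l := t)
                    (by rw [← htd, hdd]; simp)
                  simpa [← htd, hdd] using this
                have hdmem : d ∈ t := htd_sub.mem (by rw [hdd]; simp)
                have hcd : c < d := lt_of_le_of_ne (hct d hdmem)
                  (fun h => hdne (by simp [h]))
                rw [hdd] at hx
                rcases List.mem_cons.mp hx with h | h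
                · exact h ▸ hcd
                · exact lt_of_lt_of_le hcd ((List.pairwise_cons.mp (hdd ▸ htd_pw)).1 x h)
          have hcount_c : (c :: t).count c = tw.length + 1 := by
            rw [← hsplit]
            have h1 : tw.count c = tw.length :=
              List.count_eq_length.mpr (fun b hb => (htwc b hb).symm)
            have h2 : td.count c = 0 :=
              List.count_eq_zero.mpr (fun h => lt_irrefl c (htd_gt c h))
            simp [List.count_append, h1, h2]
          have hcount_ne : ∀ x, x ≠ c → (c :: t).count x = td.count x := by
            intro x hx
            rw [← hsplit]
            have h1 : tw.count x = 0 :=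
              List.count_eq_zero.mpr (fun h => hx (htwc x h))
            simp [List.count_append, h1, Ne.symm hx]
          have hlen' : td.length ≤ n := by
            have h1 : td.length ≤ t.length := htd ▸ List.length_dropWhile_le _ _
            simp only [List.length_cons, Nat.succ_le_succ_iff] at hlen
            omega
          rw [runLengths]
          rw [← htw, ← htd]
          constructor
          · intro hk
            rcases List.mem_cons.mp hk with hk | hk
            · exact ⟨c, List.mem_cons_self, by rw [hcount_c]; omega⟩
            · rcases (ih td hlen' htd_pw).mp hk with ⟨x, hxm, hxc⟩
              have hxne : x ≠ c := fun h => lt_irrefl c (h ▸ htd_gt x hxm)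
              exact ⟨x, List.mem_cons_of_mem _ (htd_sub.mem hxm),
                by rw [hcount_ne x hxne]; exact hxc⟩
          · rintro ⟨x, hxm, hxc⟩
            by_cases hx : x = c
            · subst hx
              have hk : k = (((tw.length + 1 : Nat) : Nat) : Int) := by
                rw [hcount_c] at hxc; omega
              rw [hk]
              exact List.mem_cons_self
            · have hxt : x ∈ t := by
                rcases List.mem_cons.mp hxm with h | h
                · exact absurd h hx
                · exact h
              have hxtd : x ∈ td := by
                rw [← hsplit] at hxt
                rcases List.mem_append.mp hxt with h | h
                · exact absurd (htwc x h) hx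
                · exact h
              exact List.mem_cons_of_mem _ ((ih td hlen' htd_pw).mpr
                ⟨x, hxtd, by rw [← hcount_ne x hx]; exact hxc⟩)

-- per id: A's set of per-character counts and B's set of run lengths of the sorted id agree on membership
theorem per_id_eq (s : String) (k : Int) :
    PySem.Set.contains
      (PySem.Set.ofList (s.toList.map (fun c => ((PySem.Str.count s (String.ofList [c]) : Nat) : Int)))) k
    = PySem.Set.contains
        (PySem.Set.ofList (runLengths (PySem.List.sorted s.toList (fun c => c) false))) k := by
  set l := s.toList
  set m := PySem.List.sorted l (fun c => c) false with hm
  have hperm : m.Perm l := PySem.List.sorted_perm l _ _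
  have hpw : m.Pairwise (· ≤ ·) := PySem.List.sorted_pairwise l _
  have hB : k ∈ runLengths m ↔ ∃ c ∈ l, ((l.count c : Nat) : Int) = k := by
    rw [mem_runLengths_sorted m.length m (le_refl _) hpw k]
    constructor
    · rintro ⟨c, hc, hk⟩
      exact ⟨c, hperm.mem_iff.mp hc, by rw [← hperm.count_eq]; exact hk⟩
    · rintro ⟨c, hc, hk⟩
      exact ⟨c, hperm.mem_iff.mpr hc, by rw [hperm.count_eq]; exact hk⟩
  have hA : k ∈ l.map (fun c => ((PySem.Str.count s (String.ofList [c]) : Nat) : Int))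
      ↔ ∃ c ∈ l, ((l.count c : Nat) : Int) = k := by
    have : ∀ c, PySem.Str.count s (String.ofList [c]) = l.count c := by
      intro c
      have : PySem.Str.count s (String.ofList [c]) = PySem.Chars.count s.toList [c] := by
        simp [PySem.Str.count, String.toList_ofList]
      rw [this, chars_count_single]
    simp only [List.mem_map]
    constructor
    · rintro ⟨c, hc, hk⟩; exact ⟨c, hc, by rw [← this c]; exact hk⟩
    · rintro ⟨c, hc, hk⟩; exact ⟨c, hc, by rw [this c]; exact hk⟩
  rw [Bool.eq_iff_iff]
  simp only [PySem.Set.contains, List.contains_iff_mem, PySem.Set.mem_ofList]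
  rw [hA, hB]

-- ===== VERDICT (by name: the statement is the Claim_ definition above) =====
theorem part1_spec : Claim_equal_part1 := by
  intro ids _
  unfold Spec_part1 part1 part1_alt
  have hfun : (fun (acc : Int × Int) (id : String) =>
      (acc.1 + (if PySem.Set.contains (PySem.Set.ofList (id.toList.map (fun c => ((PySem.Str.count id (String.ofList [c]) : Nat) : Int)))) 2 then (1:Int) else 0),
       acc.2 + (if PySem.Set.contains (PySem.Set.ofList (id.toList.map (fun c => ((PySem.Str.count id (String.ofList [c]) : Nat) : Int)))) 3 then (1:Int) else 0)))
      = (fun (acc : Int × Int) (id : String) =>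
      (acc.1 + (if PySem.Set.contains (PySem.Set.ofList (runLengths (PySem.List.sorted id.toList (fun c => c) false))) 2 then (1:Int) else 0),
       acc.2 + (if PySem.Set.contains (PySem.Set.ofList (runLengths (PySem.List.sorted id.toList (fun c => c) false))) 3 then (1:Int) else 0))) := by
    funext acc id
    rw [per_id_eq id 2, per_id_eq id 3]
  simp only [hfun]
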